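-- pv_equiv track=rewrite | github.com/afni/afni | src/python_scripts/afnipy/lib_apqc_tcsh.py | vlines_combine_coord_lists
-- ===== SOURCE A (Python) =====
-- def vlines_combine_coord_lists(list_coordlist, list_title, maxnblock = 3):
--     '''Take a list of lists (of coords) and create a block of text to
-- visualize in APQC by stacking the lists adjacently.
--
--     Parameters
--     ----------
--     list_coordlist : list (of lists (of str))
--             1 or more lists of coordinates;  each sublist is a list
--             of strings (one string is a row of coords)
--     list_title : list (of str)
--             list of titles to put at the top of each column
--     maxnblock : int
--             max number text blocks to output, by default.
--
--     Return
--     ------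
--     otext : str
--             text block to be used in APQC report. Consecutive lists
--             of text
--
--     '''
--
--     nlist = len(list_coordlist)
--
--     if nlist == 0 :                  return ''
--     if nlist != len(list_title) :    return ''
--
--     # only use as many as we can and/or are allowed
--     ntot  = nlist
--     extra = ''
--     if maxnblock < ntot :
--         ntot  = maxnblock
--         extra = '  ...'      # hint that more files than are shown exist
--
--     # store nrows and max row width for each list
--     l_nrow   = []
--     l_maxwid = []
--     for n in range(ntot):
--         coordlist = list_coordlist[n]
--         l_nrow.append(len(coordlist))
--         maxwid = -1
--         for y in coordlist :
--             if len(y) > maxwid :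
--                 maxwid = len(y)
--         l_maxwid.append(maxwid)
--     max_nrow = max(l_nrow)
--
--     # commence the text string
--     otext = ''
--
--     # the title line
--     for n in range(ntot) :
--         otext+= '{title:^{wid}s}'.format(title=list_title[n],
--                                          wid=l_maxwid[n])
--         if n < ntot-1 :
--             otext+= ' '*2
--         else:
--             otext+= extra + '\n'
--
--     # the title underlining
--     for n in range(ntot) :
--         otext+= '-'*l_maxwid[n]
--         if n < ntot-1 :
--             otext+= ' '*2
--         else:
--             otext+= '\n'
--
--     # each row of info
--     for i in range(max_nrow):
--         for n in range(ntot) :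
--             # print a row *if* it exists
--             if i < l_nrow[n]:
--                 otext+= '{row:<{wid}s}'.format(row=list_coordlist[n][i],
--                                                wid=l_maxwid[n])
--             else:
--                 otext+= ' '*l_maxwid[n]
--             if n < ntot-1 :
--                 otext+= ' '*2
--             else:
--                 otext+= '\n'
--
--     return otext
-- ===== SOURCE B (Python) =====
-- def vlines_combine_coord_lists(list_coordlist, list_title, maxnblock=3):
--     nlist = len(list_coordlist)
--     if nlist == 0:
--         return ''
--     if nlist != len(list_title):
--         return ''
--     extra = '  ...' if maxnblock < nlist else ''
--     ntot = min(nlist, maxnblock)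
--     shown = list_coordlist[:ntot]
--     max_nrow = max((len(rows) for rows in shown), default=0)
--     # build each column top-to-bottom: title, underline, rows, blank padding
--     cols = []
--     for n in range(ntot):
--         rows = shown[n]
--         wid = max((len(y) for y in rows), default=-1)
--         col = ['{:^{wid}s}'.format(list_title[n], wid=wid), '-' * wid]
--         col += ['{:<{wid}s}'.format(y, wid=wid) for y in rows]
--         col += [' ' * wid] * (max_nrow - len(rows))
--         cols.append(col)
--     # transpose columns into lines
--     lines = ['  '.join(cells) for cells in zip(*cols)]
--     if lines:
--         lines[0] += extra
--     return ''.join(line + '\n' for line in lines)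
-- ===== Notes on version B (the rewrite author's own statement) =====
-- stated objective: alternative
-- what changed: B replaces A's three sequential row-major formatting loops by building one list of formatted cells per column (title, underline, rows, blank padding) and transposing the columns with zip, joining each transposed line; same cost, different decomposition.
import Mathlib
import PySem

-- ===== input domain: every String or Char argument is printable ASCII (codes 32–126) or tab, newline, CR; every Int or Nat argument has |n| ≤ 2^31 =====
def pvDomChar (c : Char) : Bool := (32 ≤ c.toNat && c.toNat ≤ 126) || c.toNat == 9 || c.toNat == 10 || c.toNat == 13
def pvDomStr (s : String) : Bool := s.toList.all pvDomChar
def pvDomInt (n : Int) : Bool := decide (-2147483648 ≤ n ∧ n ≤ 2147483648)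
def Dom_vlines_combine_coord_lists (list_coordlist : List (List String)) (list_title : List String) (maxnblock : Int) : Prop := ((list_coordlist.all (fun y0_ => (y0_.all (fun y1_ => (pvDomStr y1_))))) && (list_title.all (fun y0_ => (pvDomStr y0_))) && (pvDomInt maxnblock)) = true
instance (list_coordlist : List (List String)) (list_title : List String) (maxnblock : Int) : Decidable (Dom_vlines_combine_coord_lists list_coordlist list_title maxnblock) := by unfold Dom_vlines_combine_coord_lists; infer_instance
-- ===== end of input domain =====

-- B re-arranges the work as build-columns-then-transpose (a different decomposition, same cost);
-- equivalence of the return value is proved on Pre_ (where Python A returns normally).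

-- shared formatting helpers, exact for Python's len(s), s*n, '{:^{w}s}' (w ≥ 0), '{:<{w}s}' (w ≥ 0)
def pvLen (s : String) : Int := (s.toList.length : Int)
def pvRep (c : Char) (n : Int) : List Char := List.replicate n.toNat c
def pvCenter (s : List Char) (w : Int) : List Char :=
  pvRep ' ' ((w - s.length) / 2) ++ s ++ pvRep ' ' ((w - s.length) - (w - s.length) / 2)
def pvLjust (s : List Char) (w : Int) : List Char := s ++ pvRep ' ' (w - s.length)

-- ===== PORT A =====
def vlines_combine_coord_lists (list_coordlist : List (List String)) (list_title : List String) (maxnblock : Int) : String :=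
  let nlist : Int := list_coordlist.length
  if nlist = 0 then "" else
  if nlist ≠ (list_title.length : Int) then "" else
  let te : Int × List Char := if maxnblock < nlist then (maxnblock, "  ...".toList) else (nlist, [])
  let ntot := te.1
  let extra := te.2
  let nw : List Int × List Int := (PySem.List.pyRange 0 ntot 1).foldl (fun p n =>
      let coordlist := PySem.List.pyGetD list_coordlist n []
      let maxwid := coordlist.foldl (fun m y => if pvLen y > m then pvLen y else m) (-1)
      (p.1 ++ [(coordlist.length : Int)], p.2 ++ [maxwid])) ([], [])
  let l_nrow := nw.1
  let l_maxwid := nw.2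
  -- Python's max(l_nrow) raises on an empty list; Pre_ excludes that input
  let max_nrow := (PySem.List.max? l_nrow (fun x => x)).getD 0
  let otext : List Char := (PySem.List.pyRange 0 ntot 1).foldl (fun acc n =>
      acc ++ pvCenter (PySem.List.pyGetD list_title n "").toList (PySem.List.pyGetD l_maxwid n 0)
          ++ (if n < ntot - 1 then [' ', ' '] else extra ++ ['\n'])) []
  let otext := (PySem.List.pyRange 0 ntot 1).foldl (fun acc n =>
      acc ++ pvRep '-' (PySem.List.pyGetD l_maxwid n 0)
          ++ (if n < ntot - 1 then [' ', ' '] else ['\n'])) otext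
  let otext := (PySem.List.pyRange 0 max_nrow 1).foldl (fun acc i =>
      (PySem.List.pyRange 0 ntot 1).foldl (fun acc2 n =>
        acc2 ++ (if i < PySem.List.pyGetD l_nrow n 0
                 then pvLjust (PySem.List.pyGetD (PySem.List.pyGetD list_coordlist n []) i "").toList (PySem.List.pyGetD l_maxwid n 0)
                 else pvRep ' ' (PySem.List.pyGetD l_maxwid n 0))
             ++ (if n < ntot - 1 then [' ', ' '] else ['\n'])) acc) otext
  String.ofList otext

-- ===== PORT B =====
-- '  '.join on one line
def pvJoin (sep : List Char) : List (List Char) → List Char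
  | [] => []
  | [x] => x
  | x :: xs => x ++ sep ++ pvJoin sep xs

-- zip(*cols): stops as soon as any column is exhausted (structural on the first column)
def pvZipGo : List (List Char) → List (List (List Char)) → List (List (List Char))
  | [], _ => []
  | x :: c0, rest =>
    if rest.any List.isEmpty then []
    else (x :: rest.map (fun c => c.headD [])) :: pvZipGo c0 (rest.map List.tail)

def pvZip : List (List (List Char)) → List (List (List Char))
  | [] => []
  | c :: rest => pvZipGo c rest

def vlines_combine_coord_lists_alt (list_coordlist : List (List String)) (list_title : List String) (maxnblock : Int) : String :=
  let nlist : Int := list_coordlist.length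
  if nlist = 0 then "" else
  if nlist ≠ (list_title.length : Int) then "" else
  let extra : List Char := if maxnblock < nlist then "  ...".toList else []
  let ntot : Int := min nlist maxnblock
  let shown := PySem.List.slice list_coordlist none (some ntot)
  let max_nrow : Int := (PySem.List.max? (shown.map (fun rows => (rows.length : Int))) (fun x => x)).getD 0
  let cols := (PySem.List.pyRange 0 ntot 1).map (fun n =>
      let rows := PySem.List.pyGetD shown n []
      let wid := (PySem.List.max? (rows.map pvLen) (fun x => x)).getD (-1)
      [pvCenter (PySem.List.pyGetD list_title n "").toList wid, pvRep '-' wid]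
        ++ rows.map (fun y => pvLjust y.toList wid)
        ++ List.replicate (max_nrow - (rows.length : Int)).toNat (pvRep ' ' wid))
  let lines := (pvZip cols).map (fun cells => pvJoin [' ', ' '] cells)
  let lines' := match lines with
    | [] => ([] : List (List Char))
    | l0 :: rest => (l0 ++ extra) :: rest
  String.ofList (lines'.foldl (fun acc l => acc ++ l ++ ['\n']) [])

-- ===== PRECONDITION & SPEC =====
-- Pre_ excludes exactly the inputs where Python A raises: max() on an empty sequence when
-- min(len(list_coordlist), maxnblock) ≤ 0 while the guards pass, and a negative format width
-- ('Sign not allowed in string format specifier') when some displayed sublist is empty.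
def Pre_vlines_combine_coord_lists (list_coordlist : List (List String)) (list_title : List String) (maxnblock : Int) : Prop :=
  list_coordlist = [] ∨ (list_coordlist.length : Int) ≠ (list_title.length : Int) ∨
    (1 ≤ maxnblock ∧ ∀ rows ∈ list_coordlist.take (min (list_coordlist.length : Int) maxnblock).toNat, rows ≠ [])
instance (list_coordlist : List (List String)) (list_title : List String) (maxnblock : Int) : Decidable (Pre_vlines_combine_coord_lists list_coordlist list_title maxnblock) := by unfold Pre_vlines_combine_coord_lists; infer_instance

def pvWitness_vlines_combine_coord_lists : List (List String) × List String × Int :=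
  ([["ab", "c"], ["xyz"]], ["T1", "T2"], 3)

def Spec_vlines_combine_coord_lists (list_coordlist : List (List String)) (list_title : List String) (maxnblock : Int) (out : String) : Prop := out = vlines_combine_coord_lists_alt list_coordlist list_title maxnblock
instance (list_coordlist : List (List String)) (list_title : List String) (maxnblock : Int) (out : String) : Decidable (Spec_vlines_combine_coord_lists list_coordlist list_title maxnblock out) := by unfold Spec_vlines_combine_coord_lists; infer_instance

-- ===== CLAIM (what is proved, stated in full; the proofs are below) =====
def Claim_equal_vlines_combine_coord_lists : Prop := ∀ (list_coordlist : List (List String)) (list_title : List String) (maxnblock : Int), Dom_vlines_combine_coord_lists list_coordlist list_title maxnblock → Pre_vlines_combine_coord_lists list_coordlist list_title maxnblock → Spec_vlines_combine_coord_lists list_coordlist list_title maxnblock (vlines_combine_coord_lists list_coordlist list_title maxnblock)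


-- ===== LEMMAS AND PROOFS =====

-- proof-side abbreviations: A's per-column width and row count
def pvWidA (lc : List (List String)) (n : Int) : Int :=
  (PySem.List.pyGetD lc n []).foldl (fun m y => if pvLen y > m then pvLen y else m) (-1)
def pvNrow (lc : List (List String)) (n : Int) : Int := ((PySem.List.pyGetD lc n []).length : Int)

-- the paired l_nrow/l_maxwid accumulation is a pair of maps
theorem pv_fold_pair {a b : Type} (f : Int → a) (g : Int → b) (rng : List Int) :
    ∀ (xs : List a) (ys : List b),
    rng.foldl (fun p n => (p.1 ++ [f n], p.2 ++ [g n])) (xs, ys) = (xs ++ rng.map f, ys ++ rng.map g) := by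
  induction rng with
  | nil => simp
  | cons n rng ih => intro xs ys; simp [ih]

theorem pv_nw (lc : List (List String)) (t : Int) :
    (PySem.List.pyRange 0 t 1).foldl (fun p n =>
      (p.1 ++ [((PySem.List.pyGetD lc n []).length : Int)],
       p.2 ++ [(PySem.List.pyGetD lc n []).foldl (fun m y => if pvLen y > m then pvLen y else m) (-1)]))
      (([], []) : List Int × List Int)
    = ((PySem.List.pyRange 0 t 1).map (pvNrow lc), (PySem.List.pyRange 0 t 1).map (pvWidA lc)) := by
  simpa [pvNrow, pvWidA] using
    pv_fold_pair (fun n => ((PySem.List.pyGetD lc n []).length : Int))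
      (fun n => (PySem.List.pyGetD lc n []).foldl (fun m y => if pvLen y > m then pvLen y else m) (-1))
      (PySem.List.pyRange 0 t 1) [] []

-- A's running-max width loop is B's max?-with-default
theorem pv_wid_eq (rows : List String) :
    rows.foldl (fun m y => if pvLen y > m then pvLen y else m) (-1)
    = (PySem.List.max? (rows.map pvLen) (fun x => x)).getD (-1) := by
  have step : ∀ (a : Int) (ys : List String),
      ys.foldl (fun m y => if pvLen y > m then pvLen y else m) a = (ys.map pvLen).foldl max a := by
    intro a ys
    induction ys generalizing a with
    | nil => simp
    | cons y ys ih =>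
      simp only [List.foldl_cons, List.map_cons, ih]
      congr 1
      split <;> omega
  cases rows with
  | nil =>
    have h : PySem.List.max? (([] : List String).map pvLen) (fun x => x) = none :=
      (PySem.List.max?_eq_none_iff _ _).mpr rfl
    simp only [List.map_nil] at h
    simp [h]
  | cons y ys =>
    have h0 : (0 : Int) ≤ pvLen y := by simp [pvLen]
    rw [step, List.map_cons, List.foldl_cons, PySem.List.max?_id_cons]
    have : max (-1 : Int) (pvLen y) = pvLen y := by omega
    simp [this]

theorem pv_join_last (sep : List Char) (xs : List (List Char)) (x : List Char) :
    pvJoin sep (xs ++ [x]) = (xs.map (fun c => c ++ sep)).flatten ++ x := by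
  induction xs with
  | nil => simp [pvJoin]
  | cons y ys ih =>
    cases ys with
    | nil => simp [pvJoin]
    | cons z zs =>
      have h1 : pvJoin sep ((y :: z :: zs) ++ [x]) = y ++ sep ++ pvJoin sep ((z :: zs) ++ [x]) := rfl
      rw [h1, ih]
      simp [List.append_assoc]

-- the 'sep between columns, tail on the last one' loop is a join
theorem pv_fold_join (sep tail : List Char) (f : Int → List Char) (t : Int) (ht : 1 ≤ t)
    (init : List Char) :
    (PySem.List.pyRange 0 t 1).foldl
      (fun acc n => acc ++ f n ++ (if n < t - 1 then sep else tail)) init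
    = init ++ pvJoin sep ((PySem.List.pyRange 0 t 1).map f) ++ tail := by
  have hsplit : t = (t - 1) + 1 := by omega
  rw [hsplit, PySem.List.pyRange_one_succ_right (by omega)]
  rw [List.foldl_append, List.map_append]
  have hcongr : (PySem.List.pyRange 0 (t - 1) 1).foldl
      (fun acc n => acc ++ f n ++ (if n < t - 1 + 1 - 1 then sep else tail)) init
      = (PySem.List.pyRange 0 (t - 1) 1).foldl (fun acc n => acc ++ (f n ++ sep)) init := by
    apply PySem.List.foldl_congr_mem
    intro acc n hn
    have := (PySem.List.mem_pyRange_one.mp hn)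
    rw [if_pos (by omega)]
    simp
  rw [hcongr, PySem.List.foldl_append_eq_flatMap]
  simp only [List.foldl_cons, List.foldl_nil, List.map_cons, List.map_nil]
  rw [if_neg (by omega)]
  rw [pv_join_last]
  simp [List.flatMap_def, List.map_map, Function.comp_def, List.append_assoc]

theorem pv_zipgo_uniform (M : Nat) :
    ∀ (c0 : List (List Char)) (rest : List (List (List Char))),
    c0.length = M → (∀ c ∈ rest, c.length = M) →
    pvZipGo c0 rest = (List.range M).map (fun i => c0.getD i [] :: rest.map (fun c => c.getD i [])) := by
  induction M with
  | zero => intro c0 rest h0 _; rw [List.length_eq_zero_iff.mp h0]; simp [pvZipGo]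
  | succ M ih =>
    intro c0 rest h0 hrest
    cases c0 with
    | nil => simp at h0
    | cons x c0 =>
      rw [pvZipGo]
      have hne : rest.any List.isEmpty = false := by
        simp only [List.any_eq_false]
        intro c hc
        have := hrest c hc
        cases c with
        | nil => simp at this
        | cons _ _ => simp
      rw [if_neg (by simp [hne])]
      rw [ih c0 (rest.map List.tail) (by simpa using h0)
        (by intro c hc; obtain ⟨d, hd, rfl⟩ := List.mem_map.mp hc
            have := hrest d hd
            simp [List.length_tail, this])]
      rw [List.range_succ_eq_map]
      simp only [List.map_cons, List.map_map, Function.comp_def, List.getD_cons_zero,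
        List.getD_cons_succ]
      congr 1
      · congr 1
        apply List.map_congr_left
        intro c hc
        have hlen := hrest c hc
        cases c with
        | nil => simp at hlen
        | cons _ _ => simp
      · apply List.map_congr_left
        intro i _
        congr 1
        apply List.map_congr_left
        intro c hc
        have hlen := hrest c hc
        cases c with
        | nil => simp at hlen
        | cons _ _ => simp

theorem pv_zip_uniform (M : Nat) (cols : List (List (List Char))) (hne : cols ≠ [])
    (hlen : ∀ c ∈ cols, c.length = M) :
    pvZip cols = (List.range M).map (fun i => cols.map (fun c => c.getD i [])) := by
  cases cols with
  | nil => exact absurd rfl hne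
  | cons c rest =>
    rw [pvZip, pv_zipgo_uniform M c rest (hlen c (by simp)) (fun d hd => hlen d (by simp [hd]))]
    simp

theorem pv_map_getD_take {a : Type} (xs : List a) (d : a) (N : Nat) (h : N ≤ xs.length) :
    (PySem.List.pyRange 0 (N : Int) 1).map (fun n => PySem.List.pyGetD xs n d) = xs.take N := by
  rw [PySem.List.pyRange_one]
  simp only [Int.sub_zero, Int.toNat_natCast, List.map_map, Function.comp_def, Int.zero_add]
  apply List.ext_getElem
  · simpa using h
  · intro i h1 h2
    simp only [List.getElem_map, List.getElem_range, PySem.List.pyGetD_natCast]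
    simp only [List.length_map, List.length_range] at h1
    rw [List.getElem_take]
    exact List.getD_eq_getElem xs d (show i < xs.length by omega)

theorem pv_witness_ok : Dom_vlines_combine_coord_lists (pvWitness_vlines_combine_coord_lists.1) (pvWitness_vlines_combine_coord_lists.2.1) (pvWitness_vlines_combine_coord_lists.2.2) ∧ Pre_vlines_combine_coord_lists (pvWitness_vlines_combine_coord_lists.1) (pvWitness_vlines_combine_coord_lists.2.1) (pvWitness_vlines_combine_coord_lists.2.2) := by decide


-- the common post-guard bodies of the two ports, with ntot and extra abstracted
def coreA (lc : List (List String)) (lt : List String) (t : Int) (extra : List Char) : String :=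
  let nw : List Int × List Int := (PySem.List.pyRange 0 t 1).foldl (fun p n =>
      let coordlist := PySem.List.pyGetD lc n []
      let maxwid := coordlist.foldl (fun m y => if pvLen y > m then pvLen y else m) (-1)
      (p.1 ++ [(coordlist.length : Int)], p.2 ++ [maxwid])) ([], [])
  let l_nrow := nw.1
  let l_maxwid := nw.2
  let max_nrow := (PySem.List.max? l_nrow (fun x => x)).getD 0
  let otext : List Char := (PySem.List.pyRange 0 t 1).foldl (fun acc n =>
      acc ++ pvCenter (PySem.List.pyGetD lt n "").toList (PySem.List.pyGetD l_maxwid n 0)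
          ++ (if n < t - 1 then [' ', ' '] else extra ++ ['\n'])) []
  let otext := (PySem.List.pyRange 0 t 1).foldl (fun acc n =>
      acc ++ pvRep '-' (PySem.List.pyGetD l_maxwid n 0)
          ++ (if n < t - 1 then [' ', ' '] else ['\n'])) otext
  let otext := (PySem.List.pyRange 0 max_nrow 1).foldl (fun acc i =>
      (PySem.List.pyRange 0 t 1).foldl (fun acc2 n =>
        acc2 ++ (if i < PySem.List.pyGetD l_nrow n 0
                 then pvLjust (PySem.List.pyGetD (PySem.List.pyGetD lc n []) i "").toList (PySem.List.pyGetD l_maxwid n 0)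
                 else pvRep ' ' (PySem.List.pyGetD l_maxwid n 0))
             ++ (if n < t - 1 then [' ', ' '] else ['\n'])) acc) otext
  String.ofList otext

def coreB (lc : List (List String)) (lt : List String) (t : Int) (extra : List Char) : String :=
  let shown := PySem.List.slice lc none (some t)
  let max_nrow : Int := (PySem.List.max? (shown.map (fun rows => (rows.length : Int))) (fun x => x)).getD 0
  let cols := (PySem.List.pyRange 0 t 1).map (fun n =>
      let rows := PySem.List.pyGetD shown n []
      let wid := (PySem.List.max? (rows.map pvLen) (fun x => x)).getD (-1)
      [pvCenter (PySem.List.pyGetD lt n "").toList wid, pvRep '-' wid]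
        ++ rows.map (fun y => pvLjust y.toList wid)
        ++ List.replicate (max_nrow - (rows.length : Int)).toNat (pvRep ' ' wid))
  let lines := (pvZip cols).map (fun cells => pvJoin [' ', ' '] cells)
  let lines' := match lines with
    | [] => ([] : List (List Char))
    | l0 :: rest => (l0 ++ extra) :: rest
  String.ofList (lines'.foldl (fun acc l => acc ++ l ++ ['\n']) [])


theorem pv_nrow_take (lc : List (List String)) (N : Nat) (h : N ≤ lc.length) :
    (PySem.List.pyRange 0 (N : Int) 1).map (pvNrow lc)
    = (lc.take N).map (fun r => (r.length : Int)) := by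
  have h1 : (PySem.List.pyRange 0 (N : Int) 1).map (pvNrow lc)
      = ((PySem.List.pyRange 0 (N : Int) 1).map (fun n => PySem.List.pyGetD lc n [])).map
          (fun r => (r.length : Int)) := by
    simp [List.map_map, Function.comp_def, pvNrow]
  rw [h1, pv_map_getD_take lc [] N h]

theorem pv_getD_mapR {a : Type} (f : Int → a) (t : Int) {n : Int}
    (hn : n ∈ PySem.List.pyRange 0 t 1) (d : a) :
    PySem.List.pyGetD ((PySem.List.pyRange 0 t 1).map f) n d = f n := by
  have h := PySem.List.mem_pyRange_one.mp hn
  exact PySem.List.pyGetD_map_pyRange_of_nonneg f t n d h.1 h.2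

theorem pv_getD_take {a : Type} (xs : List a) (N : Nat) (h : N ≤ xs.length) {n : Int}
    (hn : n ∈ PySem.List.pyRange 0 (N : Int) 1) (d : a) :
    PySem.List.pyGetD (xs.take N) n d = PySem.List.pyGetD xs n d := by
  have hb := PySem.List.mem_pyRange_one.mp hn
  obtain ⟨k, rfl⟩ : ∃ k : Nat, n = (k : Int) := ⟨n.toNat, by omega⟩
  have hk : k < N := by exact_mod_cast hb.2
  rw [PySem.List.pyGetD_natCast, PySem.List.pyGetD_natCast]
  rw [List.getD_eq_getElem _ _ (by simp; omega), List.getD_eq_getElem _ _ (by omega)]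
  exact List.getElem_take

theorem pv_fold_lines (xs : List (List Char)) (init : List Char) :
    xs.foldl (fun acc l => acc ++ l ++ ['\n']) init
    = init ++ (xs.flatMap (fun l => l ++ ['\n'])) := by
  rw [PySem.List.foldl_congr_mem xs _ (fun acc l => acc ++ (l ++ ['\n'])) init
    (by intro acc x _; simp [List.append_assoc])]
  exact PySem.List.foldl_append_eq_flatMap _ _ _

theorem pv_flatMap_congr {a b : Type} (l : List a) (f g : a → List b)
    (h : ∀ x ∈ l, f x = g x) : l.flatMap f = l.flatMap g := by
  induction l with
  | nil => rfl
  | cons x xs ih =>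
    simp only [List.flatMap_cons]
    rw [h x (by simp), ih (fun y hy => h y (by simp [hy]))]

theorem pv_core (lc : List (List String)) (lt : List String) (t : Int) (extra : List Char)
    (h1 : 1 ≤ t) (h2 : t ≤ (lc.length : Int)) (h3 : t ≤ (lt.length : Int)) :
    coreA lc lt t extra = coreB lc lt t extra := by
  obtain ⟨N, rfl⟩ : ∃ N : Nat, t = (N : Int) := ⟨t.toNat, by omega⟩
  have hN1 : 1 ≤ N := by exact_mod_cast h1
  have hNlc : N ≤ lc.length := by exact_mod_cast h2
  have hNlt : N ≤ lt.length := by exact_mod_cast h3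
  simp only [coreA, coreB]
  rw [pv_nw]
  dsimp only
  rw [PySem.List.slice_to lc (by positivity)]
  rw [pv_nrow_take lc N hNlc]
  simp only [Int.toNat_natCast]
  have hNt : (1 : Int) ≤ (N : Int) := by exact_mod_cast hN1
  rw [pv_fold_join [' ', ' '] (extra ++ ['\n']) _ (N : Int) hNt []]
  rw [pv_fold_join [' ', ' '] ['\n'] _ (N : Int) hNt _]
  set NR : List Int := List.map (fun r => ((r.length : Nat) : Int)) (List.take N lc) with hNR
  set M : Int := (PySem.List.max? NR fun x => x).getD 0 with hM
  set W : List Int := List.map (pvWidA lc) (PySem.List.pyRange 0 (N : Int) 1) with hW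
  have hrow : ∀ (acc : List Char) (i : Int),
      List.foldl (fun acc2 n =>
        (acc2 ++ if i < PySem.List.pyGetD NR n 0 then
            pvLjust (PySem.List.pyGetD (PySem.List.pyGetD lc n []) i "").toList (PySem.List.pyGetD W n 0)
          else pvRep ' ' (PySem.List.pyGetD W n 0)) ++
        if n < (N : Int) - 1 then [' ', ' '] else ['\n']) acc (PySem.List.pyRange 0 (N : Int) 1)
      = acc ++ (pvJoin [' ', ' '] ((PySem.List.pyRange 0 (N : Int) 1).map (fun n =>
          if i < PySem.List.pyGetD NR n 0 then
            pvLjust (PySem.List.pyGetD (PySem.List.pyGetD lc n []) i "").toList (PySem.List.pyGetD W n 0)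
          else pvRep ' ' (PySem.List.pyGetD W n 0))) ++ ['\n']) := by
    intro acc i
    rw [pv_fold_join [' ', ' '] ['\n'] _ (N : Int) hNt acc, List.append_assoc]
  rw [PySem.List.foldl_congr_mem (PySem.List.pyRange 0 M 1) _ _ _ (fun acc i _ => hrow acc i)]
  rw [PySem.List.foldl_append_eq_flatMap]
  -- facts about the range and the column maximum
  have hRne : PySem.List.pyRange 0 (N : Int) 1 ≠ [] := by
    rw [PySem.List.pyRange_one_cons (by exact_mod_cast hN1)]
    simp
  have hNReq : NR = (PySem.List.pyRange 0 (N : Int) 1).map (pvNrow lc) := by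
    rw [hNR, pv_nrow_take lc N hNlc]
  have hNRn : ∀ n ∈ PySem.List.pyRange 0 (N : Int) 1, PySem.List.pyGetD NR n 0 = pvNrow lc n := by
    intro n hn
    rw [hNReq]
    exact pv_getD_mapR _ _ hn _
  have hWn : ∀ n ∈ PySem.List.pyRange 0 (N : Int) 1, PySem.List.pyGetD W n 0 = pvWidA lc n := by
    intro n hn
    rw [hW]
    exact pv_getD_mapR _ _ hn _
  have hlenM : ∀ n ∈ PySem.List.pyRange 0 (N : Int) 1, pvNrow lc n ≤ M := by
    intro n hn
    have hmem : pvNrow lc n ∈ NR := by rw [hNReq]; exact List.mem_map_of_mem hn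
    obtain ⟨m, hm⟩ : ∃ m, PySem.List.max? NR (fun x => x) = some m := by
      cases hmax : PySem.List.max? NR (fun x => x) with
      | none =>
        have : NR = [] := (PySem.List.max?_eq_none_iff _ _).mp hmax
        rw [hNReq] at this
        simp [hRne] at this
      | some m => exact ⟨m, rfl⟩
    have := PySem.List.max?_isMax hm _ hmem
    rw [hM, hm]
    simpa using this
  have hM0 : 0 ≤ M := by
    have h0mem : (0 : Int) ∈ PySem.List.pyRange 0 (N : Int) 1 := by
      rw [PySem.List.mem_pyRange_one]
      constructor <;> omega
    have := hlenM 0 h0mem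
    have h0 : 0 ≤ pvNrow lc 0 := by simp [pvNrow]
    omega
  -- B side: canonicalize the columns
  have hcols : List.map
      (fun n =>
        [pvCenter (PySem.List.pyGetD lt n "").toList
            ((PySem.List.max? (List.map pvLen (PySem.List.pyGetD (List.take N lc) n [])) fun x => x).getD (-1)),
         pvRep '-'
            ((PySem.List.max? (List.map pvLen (PySem.List.pyGetD (List.take N lc) n [])) fun x => x).getD (-1))] ++
        List.map
          (fun y => pvLjust y.toList
            ((PySem.List.max? (List.map pvLen (PySem.List.pyGetD (List.take N lc) n [])) fun x => x).getD (-1)))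
          (PySem.List.pyGetD (List.take N lc) n []) ++
        List.replicate (M - ((PySem.List.pyGetD (List.take N lc) n []).length : Int)).toNat
          (pvRep ' '
            ((PySem.List.max? (List.map pvLen (PySem.List.pyGetD (List.take N lc) n [])) fun x => x).getD (-1))))
      (PySem.List.pyRange 0 (N : Int) 1)
      = List.map
      (fun n =>
        pvCenter (PySem.List.pyGetD lt n "").toList (pvWidA lc n) ::
        pvRep '-' (pvWidA lc n) ::
        (List.map (fun y => pvLjust y.toList (pvWidA lc n)) (PySem.List.pyGetD lc n []) ++
         List.replicate (M - ((PySem.List.pyGetD lc n []).length : Int)).toNat (pvRep ' ' (pvWidA lc n))))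
      (PySem.List.pyRange 0 (N : Int) 1) := by
    apply List.map_congr_left
    intro n hn
    rw [pv_getD_take lc N hNlc hn, ← pv_wid_eq]
    simp [pvWidA]
  rw [hcols]
  rw [pv_zip_uniform (M.toNat + 2) _
    (by simpa using hRne)
    (by
      intro c hc
      obtain ⟨n, hn, rfl⟩ := List.mem_map.mp hc
      have h1 := hlenM n hn
      have h2 : 0 ≤ pvNrow lc n := by simp [pvNrow]
      simp only [List.length_cons, List.length_append, List.length_map, List.length_replicate]
      simp only [pvNrow] at h1 h2
      omega)]
  rw [show M.toNat + 2 = M.toNat + 1 + 1 from rfl, List.range_succ_eq_map, List.range_succ_eq_map]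
  simp only [List.map_cons, List.map_map]
  rw [pv_fold_lines]
  simp only [List.flatMap_cons, Function.comp_def, List.getD_cons_zero, List.getD_cons_succ,
    List.flatMap_map, List.nil_append]
  rw [PySem.List.pyRange_one 0 M]
  simp only [Int.sub_zero, List.flatMap_map, Int.zero_add]
  have eT : List.map (fun n => pvCenter (PySem.List.pyGetD lt n "").toList (PySem.List.pyGetD W n 0))
      (PySem.List.pyRange 0 (N : Int) 1)
      = List.map (fun n => pvCenter (PySem.List.pyGetD lt n "").toList (pvWidA lc n))
      (PySem.List.pyRange 0 (N : Int) 1) :=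
    List.map_congr_left (fun n hn => by rw [hWn n hn])
  have eD : List.map (fun n => pvRep '-' (PySem.List.pyGetD W n 0)) (PySem.List.pyRange 0 (N : Int) 1)
      = List.map (fun n => pvRep '-' (pvWidA lc n)) (PySem.List.pyRange 0 (N : Int) 1) :=
    List.map_congr_left (fun n hn => by rw [hWn n hn])
  have eR : List.flatMap
      (fun (a : Nat) =>
        pvJoin [' ', ' ']
            (List.map
              (fun n =>
                if (a : Int) < PySem.List.pyGetD NR n 0 then
                  pvLjust (PySem.List.pyGetD (PySem.List.pyGetD lc n []) ((a : Int)) "").toList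
                    (PySem.List.pyGetD W n 0)
                else pvRep ' ' (PySem.List.pyGetD W n 0))
              (PySem.List.pyRange 0 (N : Int) 1)) ++
          ['\n'])
      (List.range M.toNat)
      = List.flatMap
      (fun (a : Nat) =>
        pvJoin [' ', ' ']
            (List.map
              (fun n =>
                (List.map (fun y => pvLjust y.toList (pvWidA lc n)) (PySem.List.pyGetD lc n []) ++
                      List.replicate (M - ((PySem.List.pyGetD lc n []).length : Int)).toNat
                        (pvRep ' ' (pvWidA lc n))).getD a [])
              (PySem.List.pyRange 0 (N : Int) 1)) ++
          ['\n'])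
      (List.range M.toNat) := by
    apply pv_flatMap_congr
    intro k hk
    have hkM : k < M.toNat := List.mem_range.mp hk
    congr 1
    congr 1
    apply List.map_congr_left
    intro n hn
    rw [hNRn n hn, hWn n hn]
    have hnr : ((PySem.List.pyGetD lc n []).length : Int) ≤ M := hlenM n hn
    rw [PySem.List.pyGetD_natCast]
    by_cases hkr : k < (PySem.List.pyGetD lc n []).length
    · rw [if_pos (by simp only [pvNrow]; exact_mod_cast hkr)]
      rw [List.getD_append _ _ _ k (by simpa using hkr)]
      rw [List.getD_eq_getElem (List.map (fun y => pvLjust y.toList (pvWidA lc n))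
        (PySem.List.pyGetD lc n [])) _ (by simpa using hkr)]
      rw [List.getElem_map]
      rw [List.getD_eq_getElem _ _ hkr]
    · rw [if_neg (by simp only [pvNrow]; intro hcon; exact hkr (by exact_mod_cast hcon))]
      rw [List.getD_append_right _ _ _ _ (by simpa using Nat.le_of_not_lt hkr)]
      have hpad : k - (PySem.List.pyGetD lc n []).length
          < (M - ((PySem.List.pyGetD lc n []).length : Int)).toNat := by omega
      rw [List.getD_eq_getElem _ _ (by simpa using hpad)]
      rw [List.getElem_replicate]
  rw [eT, eD, eR]
  simp [List.append_assoc]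

-- ===== VERDICT (by name: the statement is the Claim_ definition above) =====
theorem vlines_combine_coord_lists_spec : Claim_equal_vlines_combine_coord_lists := by
  intro lc lt mb _ hpre
  unfold Spec_vlines_combine_coord_lists
  simp only [vlines_combine_coord_lists, vlines_combine_coord_lists_alt]
  by_cases h0 : (lc.length : Int) = 0
  · rw [if_pos h0, if_pos h0]
  rw [if_neg h0, if_neg h0]
  by_cases h1 : (lc.length : Int) ≠ (lt.length : Int)
  · rw [if_pos h1, if_pos h1]
  rw [if_neg h1, if_neg h1]
  have hlen : (lc.length : Int) = (lt.length : Int) := not_not.mp h1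
  rcases hpre with h | h | ⟨hmb, -⟩
  · exact absurd (by simp [h]) h0
  · exact absurd h h1
  by_cases h2 : mb < (lc.length : Int)
  · rw [if_pos h2, if_pos h2]
    rw [show min (lc.length : Int) mb = mb by omega]
    exact pv_core lc lt mb _ (by omega) (by omega) (by omega)
  · rw [if_neg h2, if_neg h2]
    rw [show min (lc.length : Int) mb = (lc.length : Int) by omega]
    exact pv_core lc lt (lc.length : Int) _ (by omega) (by omega) (by omega)
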